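-- pv_equiv track=rewrite | github.com/ktilwebalo-hub/python-class | nesting/C_nesting/spam.py | spam
-- ===== SOURCE A (Python) =====
-- def spam(pairs):
--     str = ""
--     for i in pairs:
--         first_ = i[0]
--         sec_ = i[1]
--         for i in range(sec_):
--             str += first_ + " "
--     return str
-- ===== SOURCE B (Python) =====
-- def _rep(s, n):
--     # repeat s n times by binary doubling (empty for n <= 0)
--     out = ""
--     while n > 0:
--         if n % 2 == 1:
--             out += s
--         s += s
--         n //= 2
--     return out
--
-- def spam(pairs):
--     parts = []
--     for p in pairs:
--         parts.append(_rep(p[0] + " ", p[1]))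
--     return "".join(parts)
-- ===== Notes on version B (the rewrite author's own statement) =====
-- stated objective: alternative
-- what changed: Replaces A's inner loop of sec individual appends by a binary-doubling repetition routine (O(log sec) concatenations per pair, squaring the piece and appending it on set bits), collecting per-pair results in a list joined once.
import Mathlib
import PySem

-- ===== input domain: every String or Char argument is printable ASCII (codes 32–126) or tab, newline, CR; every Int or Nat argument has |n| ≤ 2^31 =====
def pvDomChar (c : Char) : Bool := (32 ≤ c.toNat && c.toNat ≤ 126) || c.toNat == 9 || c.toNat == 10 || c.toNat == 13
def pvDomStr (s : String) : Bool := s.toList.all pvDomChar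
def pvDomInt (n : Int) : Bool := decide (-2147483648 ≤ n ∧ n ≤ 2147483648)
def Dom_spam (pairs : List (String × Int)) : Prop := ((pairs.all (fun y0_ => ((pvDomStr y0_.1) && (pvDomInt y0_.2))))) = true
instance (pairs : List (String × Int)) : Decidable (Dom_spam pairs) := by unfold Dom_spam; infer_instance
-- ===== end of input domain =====

-- B replaces A's inner per-count append loop by binary-doubling string repetition, joining a per-pair parts list once (objective: alternative).

-- ===== PORT A =====
-- literal port: outer for over pairs, inner for over range(sec_) appending first_ + " "
def spam (pairs : List (String × Int)) : String :=
  pairs.foldl (fun str i =>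
    let first_ := i.1
    let sec_ := i.2
    (PySem.List.pyRange 0 sec_ 1).foldl (fun str _ => str ++ (first_ ++ " ")) str) ""

-- ===== PORT B =====
-- the while-loop of _rep: state (out, s, n); n % 2, n //= 2 via PySem floor arithmetic
def repAux (out s : String) (n : Int) : String :=
  if n ≤ 0 then out
  else repAux (if PySem.Int.mod n 2 == 1 then out ++ s else out)
              (s ++ s) (PySem.Int.floordiv n 2)
termination_by n.toNat
decreasing_by
  rw [PySem.Int.floordiv_eq_ediv_of_pos (by omega)]
  omega

def rep (s : String) (n : Int) : String := repAux "" s n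

def spam_alt (pairs : List (String × Int)) : String :=
  PySem.Str.join ""
    (pairs.foldl (fun parts p => parts ++ [rep (p.1 ++ " ") p.2]) [])

-- ===== PRECONDITION & SPEC =====
def Spec_spam (pairs : List (String × Int)) (out : String) : Prop := out = spam_alt pairs
instance (pairs : List (String × Int)) (out : String) : Decidable (Spec_spam pairs out) := by unfold Spec_spam; infer_instance

-- ===== CLAIM =====
def Claim_equal_spam : Prop := ∀ (pairs : List (String × Int)), Dom_spam pairs → Spec_spam pairs (spam pairs)

-- ===== LEMMAS AND PROOFS =====

-- J m s = s repeated m times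
def J (m : Nat) (s : String) : String := PySem.Str.join "" (List.replicate m s)

theorem join_empty_nil : PySem.Str.join "" ([] : List String) = "" := by decide

theorem join_empty_cons (p : String) (rest : List String) :
    PySem.Str.join "" (p :: rest) = p ++ PySem.Str.join "" rest := by
  cases rest with
  | nil => apply String.toList_inj.mp; simp
  | cons b t => apply String.toList_inj.mp; simp [PySem.Chars.join_cons_cons]

theorem J_zero (s : String) : J 0 s = "" := by simp [J, join_empty_nil]

theorem J_succ (m : Nat) (s : String) : J (m + 1) s = s ++ J m s := by
  simp [J, List.replicate_succ, join_empty_cons]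

theorem J_one (s : String) : J 1 s = s := by
  rw [show (1:Nat) = 0 + 1 from rfl, J_succ, J_zero, String.append_empty]

theorem J_add (a b : Nat) (s : String) : J (a + b) s = J a s ++ J b s := by
  induction a with
  | zero => rw [Nat.zero_add, J_zero]; exact (String.empty_append).symm
  | succ k ih =>
      have : k + 1 + b = (k + b) + 1 := by omega
      rw [this, J_succ, J_succ, ih, String.append_assoc]

theorem J_double (m : Nat) (s : String) : J m (s ++ s) = J (2 * m) s := by
  induction m with
  | zero => simp [J_zero]
  | succ k ih =>
      rw [J_succ, ih]
      have : 2 * (k + 1) = 2 + 2 * k := by omega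
      rw [this, J_add]
      rw [show (2:Nat) = 1 + 1 from rfl, J_add, J_one]

theorem repAux_eq (out s : String) (n : Int) :
    repAux out s n = out ++ J n.toNat s := by
  induction out, s, n using repAux.induct with
  | case1 out s n h =>
      rw [repAux, if_pos h]
      have : n.toNat = 0 := by omega
      rw [this, J_zero, String.append_empty]
  | case2 out s n h ih =>
      simp only [dite_eq_ite] at ih
      rw [repAux, if_neg h, ih]
      rw [PySem.Int.mod_eq_emod_of_pos (by omega), PySem.Int.floordiv_eq_ediv_of_pos (by omega)] at *
      rw [J_double]
      by_cases hodd : n % 2 = 1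
      · rw [if_pos (by simp [hodd])]
        have h2 : n.toNat = 1 + 2 * (n / 2).toNat := by omega
        rw [h2, J_add, String.append_assoc]
        congr 1
        rw [J_one]
      · rw [if_neg (by simp; omega)]
        have h2 : n.toNat = 2 * (n / 2).toNat := by omega
        rw [h2]

-- the parts-building fold is a map
theorem foldl_parts (pairs : List (String × Int)) (acc : List String) :
    pairs.foldl (fun parts p => parts ++ [rep (p.1 ++ " ") p.2]) acc
      = acc ++ pairs.map (fun p => rep (p.1 ++ " ") p.2) := by
  induction pairs generalizing acc with
  | nil => simp
  | cons p rest ih => simp [ih]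

-- A's inner loop appends (first ++ " ") once per range element
theorem foldl_const_append {α : Type} (l : List α) (t : String) (acc : String) :
    l.foldl (fun s _ => s ++ t) acc = acc ++ J l.length t := by
  induction l generalizing acc with
  | nil => simp [J_zero, String.append_empty]
  | cons x xs ih =>
      simp only [List.foldl_cons, List.length_cons]
      rw [ih, show xs.length + 1 = 1 + xs.length from by omega, J_add, J_one,
        String.append_assoc]

theorem inner_loop_eq (t : String) (n : Int) (acc : String) :
    (PySem.List.pyRange 0 n 1).foldl (fun s _ => s ++ t) acc = acc ++ J n.toNat t := by
  have h : (PySem.List.pyRange 0 n 1).length = n.toNat := by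
    rw [PySem.List.length_pyRange_one]; omega
  rw [foldl_const_append, h]

theorem outer_loop_eq (pairs : List (String × Int)) (acc : String) :
    pairs.foldl (fun str i =>
      (PySem.List.pyRange 0 i.2 1).foldl (fun str _ => str ++ (i.1 ++ " ")) str) acc
    = acc ++ PySem.Str.join "" (pairs.map (fun p => J p.2.toNat (p.1 ++ " "))) := by
  induction pairs generalizing acc with
  | nil => simp [join_empty_nil, String.append_empty]
  | cons p rest ih =>
      simp only [List.foldl_cons]
      rw [inner_loop_eq, ih, List.map_cons, join_empty_cons, String.append_assoc]

-- ===== VERDICT =====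
theorem spam_spec : Claim_equal_spam := by
  intro pairs _
  unfold Spec_spam spam spam_alt
  rw [outer_loop_eq, foldl_parts, String.empty_append]
  simp only [List.nil_append]
  congr 1
  apply List.map_congr_left
  intro p _
  exact (repAux_eq "" (p.1 ++ " ") p.2).symm
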